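-- pv_equiv track=rewrite | github.com/Scarletsa/Dominos | generate_list.py | consolidateStreets
-- ===== SOURCE A (Python) =====
-- def consolidateStreets(lists):
--     i = 1
--     while i < len(lists):
--         if (lists[i][0] == lists[i-1][0]):
--             lists[i-1][1] = lists[i-1][1] + ", " + lists[i][1]
--             lists.pop(i)
--         else:
--             i += 1
--
--     return lists
-- ===== SOURCE B (Python) =====
-- def consolidateStreets(lists):
--     out = []
--     for entry in lists:
--         if out and out[-1][0] == entry[0]:
--             out[-1][1] += ", " + entry[1]
--         else:
--             out.append(list(entry))
--     return out
-- ===== Notes on version B (the rewrite author's own statement) =====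
-- stated objective: alternative
-- what changed: Replaced the in-place while loop that repeatedly indexes and pops merged entries by a single forward pass that appends each entry to a fresh output list or concatenates its field into the last output entry.
import Mathlib
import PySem

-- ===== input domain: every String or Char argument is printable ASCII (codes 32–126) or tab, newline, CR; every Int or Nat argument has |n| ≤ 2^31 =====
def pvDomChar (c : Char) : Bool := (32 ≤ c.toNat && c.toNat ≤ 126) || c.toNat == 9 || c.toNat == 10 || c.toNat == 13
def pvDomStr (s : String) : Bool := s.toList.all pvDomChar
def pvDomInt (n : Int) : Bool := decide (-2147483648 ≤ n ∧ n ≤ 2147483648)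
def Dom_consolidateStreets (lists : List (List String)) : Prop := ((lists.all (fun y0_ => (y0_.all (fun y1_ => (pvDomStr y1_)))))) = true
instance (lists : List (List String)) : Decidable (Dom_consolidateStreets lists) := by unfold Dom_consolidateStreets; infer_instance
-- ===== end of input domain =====

-- B replaces A's index-and-pop while loop by one forward pass that appends to a fresh
-- output list or merges into its last entry (return-value equivalence only: Python A
-- mutates its argument in place, B builds a fresh list).

-- ===== PORT A =====
-- While loop over (lists, i); indexing via getD (Pre_ excludes the inputs where
-- Python's lists[i][0] / lists[i-1][1] would raise IndexError), pop(i) via eraseIdx.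
def consolidateStreetsLoop (lists : List (List String)) (i : Nat) : List (List String) :=
  if h : i < lists.length then
    if (lists.getD i []).getD 0 "" = (lists.getD (i - 1) []).getD 0 "" then
      let prev := lists.getD (i - 1) []
      let merged := prev.set 1 (prev.getD 1 "" ++ ", " ++ (lists.getD i []).getD 1 "")
      consolidateStreetsLoop ((lists.set (i - 1) merged).eraseIdx i) i
    else
      consolidateStreetsLoop lists (i + 1)
  else lists
termination_by lists.length - i
decreasing_by
  · simp only [List.length_eraseIdx, List.length_set, if_pos h]
    omega
  · omega

def consolidateStreets (lists : List (List String)) : List (List String) :=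
  consolidateStreetsLoop lists 1

-- ===== PORT B =====
-- Source B's single pass: fold over the entries, accumulator = output in reverse
-- (Python appends at the back and edits out[-1]; here that is the head), reversed at the end.
def consolidateStreetsAltStep (out : List (List String)) (entry : List String) : List (List String) :=
  match out with
  | last :: rest =>
    if last.getD 0 "" = entry.getD 0 "" then
      last.set 1 (last.getD 1 "" ++ ", " ++ entry.getD 1 "") :: rest
    else
      entry :: last :: rest
  | [] => [entry]

def consolidateStreets_alt (lists : List (List String)) : List (List String) :=
  (lists.foldl consolidateStreetsAltStep []).reverse

-- ===== PRECONDITION & SPEC =====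
-- Pre_ = exactly the inputs on which Python A returns (no IndexError): every sublist is
-- nonempty (unless there is at most one, whose head is never read), and any two adjacent
-- sublists with equal heads both have length ≥ 2 (their index-1 fields are read and merged).
def Pre_consolidateStreets (lists : List (List String)) : Prop :=
  (lists.length ≤ 1 ∨ ∀ l ∈ lists, l ≠ []) ∧
  ∀ p ∈ lists.zip lists.tail, p.1.getD 0 "" = p.2.getD 0 "" → 2 ≤ p.1.length ∧ 2 ≤ p.2.length
instance (lists : List (List String)) : Decidable (Pre_consolidateStreets lists) := by
  unfold Pre_consolidateStreets; infer_instance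

def pvWitness_consolidateStreets : List (List String) :=
  [["a", "1"], ["a", "2"], ["b", "3"], ["c"]]

def Spec_consolidateStreets (lists : List (List String)) (out : List (List String)) : Prop := out = consolidateStreets_alt lists
instance (lists : List (List String)) (out : List (List String)) : Decidable (Spec_consolidateStreets lists out) := by unfold Spec_consolidateStreets; infer_instance

-- ===== CLAIM (what is proved, stated in full; the proofs are below) =====
def Claim_equal_consolidateStreets : Prop := ∀ (lists : List (List String)), Dom_consolidateStreets lists → Pre_consolidateStreets lists → Spec_consolidateStreets lists (consolidateStreets lists)

-- ===== LEMMAS AND PROOFS =====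

-- Common characterisation of both ports: merge maximal runs of equal-headed entries.
def mergeRuns : List (List String) → List (List String)
  | [] => []
  | [x] => [x]
  | x :: y :: rest =>
    if y.getD 0 "" = x.getD 0 "" then
      mergeRuns (x.set 1 (x.getD 1 "" ++ ", " ++ y.getD 1 "") :: rest)
    else
      x :: mergeRuns (y :: rest)
termination_by l => l.length

theorem getD_append_len_add {α : Type} (done l : List α) (k : Nat) (d : α) :
    (done ++ l).getD (done.length + k) d = l.getD k d := by
  induction done with
  | nil => simp
  | cons a done ih => simpa [Nat.succ_add] using ih

theorem set_append_len_add {α : Type} (done l : List α) (k : Nat) (a : α) :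
    (done ++ l).set (done.length + k) a = done ++ l.set k a := by
  induction done with
  | nil => simp
  | cons b done ih => simpa [Nat.succ_add] using ih

theorem eraseIdx_append_len_add {α : Type} (done l : List α) (k : Nat) :
    (done ++ l).eraseIdx (done.length + k) = done ++ l.eraseIdx k := by
  induction done with
  | nil => simp
  | cons b done ih => simpa [Nat.succ_add] using ih

theorem loop_eq_mergeRuns (rest : List (List String)) :
    ∀ (done : List (List String)) (x : List String),
      consolidateStreetsLoop (done ++ x :: rest) (done.length + 1) =
        done ++ mergeRuns (x :: rest) := by
  induction rest with
  | nil =>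
    intro done x
    rw [consolidateStreetsLoop]
    simp [mergeRuns]
  | cons y rest ih =>
    intro done x
    rw [consolidateStreetsLoop]
    have hlen : done.length + 1 < (done ++ x :: y :: rest).length := by
      simp only [List.length_append, List.length_cons]; omega
    have hy : (done ++ x :: y :: rest).getD (done.length + 1) [] = y := by
      simpa using getD_append_len_add done (x :: y :: rest) 1 []
    have hx : (done ++ x :: y :: rest).getD (done.length + 1 - 1) [] = x := by
      simpa using getD_append_len_add done (x :: y :: rest) 0 []
    rw [dif_pos hlen, hy, hx]
    by_cases hc : y.getD 0 "" = x.getD 0 ""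
    · rw [if_pos hc]
      show consolidateStreetsLoop
          (((done ++ x :: y :: rest).set (done.length + 1 - 1)
            (x.set 1 (x.getD 1 "" ++ ", " ++ y.getD 1 ""))).eraseIdx (done.length + 1))
          (done.length + 1) = done ++ mergeRuns (x :: y :: rest)
      have hset : (done ++ x :: y :: rest).set (done.length + 1 - 1)
            (x.set 1 (x.getD 1 "" ++ ", " ++ y.getD 1 "")) =
          done ++ x.set 1 (x.getD 1 "" ++ ", " ++ y.getD 1 "") :: y :: rest := by
        simpa using set_append_len_add done (x :: y :: rest) 0
          (x.set 1 (x.getD 1 "" ++ ", " ++ y.getD 1 ""))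
      rw [hset]
      have herase : (done ++ x.set 1 (x.getD 1 "" ++ ", " ++ y.getD 1 "") :: y :: rest).eraseIdx
            (done.length + 1) =
          done ++ x.set 1 (x.getD 1 "" ++ ", " ++ y.getD 1 "") :: rest := by
        simpa using eraseIdx_append_len_add done
          (x.set 1 (x.getD 1 "" ++ ", " ++ y.getD 1 "") :: y :: rest) 1
      rw [herase, ih done (x.set 1 (x.getD 1 "" ++ ", " ++ y.getD 1 ""))]
      rw [mergeRuns, if_pos hc]
    · rw [if_neg hc]
      have hrearr : done ++ x :: y :: rest = (done ++ [x]) ++ y :: rest := by simp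
      have hlen2 : done.length + 1 + 1 = (done ++ [x]).length + 1 := by simp
      rw [hrearr, hlen2, ih (done ++ [x]) y]
      rw [mergeRuns, if_neg hc]
      simp

theorem fold_eq_mergeRuns (xs : List (List String)) :
    ∀ (last : List String) (revdone : List (List String)),
      (xs.foldl consolidateStreetsAltStep (last :: revdone)).reverse =
        revdone.reverse ++ mergeRuns (last :: xs) := by
  induction xs with
  | nil =>
    intro last revdone
    simp [mergeRuns]
  | cons y xs ih =>
    intro last revdone
    simp only [List.foldl_cons, consolidateStreetsAltStep]
    by_cases hc : last.getD 0 "" = y.getD 0 ""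
    · rw [if_pos hc]
      rw [ih]
      rw [mergeRuns, if_pos hc.symm]
    · rw [if_neg hc]
      rw [ih y (last :: revdone)]
      rw [mergeRuns, if_neg (fun h => hc h.symm)]
      simp

theorem consolidateStreets_eq_alt (lists : List (List String)) :
    consolidateStreets lists = consolidateStreets_alt lists := by
  cases lists with
  | nil =>
    rw [consolidateStreets, consolidateStreetsLoop]
    simp [consolidateStreets_alt]
  | cons x rest =>
    have hA : consolidateStreets (x :: rest) = mergeRuns (x :: rest) := by
      simpa using loop_eq_mergeRuns rest [] x
    have hB : consolidateStreets_alt (x :: rest) = mergeRuns (x :: rest) := by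
      unfold consolidateStreets_alt
      simpa [consolidateStreetsAltStep] using fold_eq_mergeRuns rest x []
    rw [hA, hB]

-- ===== VERDICT (by name: the statement is the Claim_ definition above) =====
theorem consolidateStreets_spec : Claim_equal_consolidateStreets := by
  intro lists _ _
  unfold Spec_consolidateStreets
  exact consolidateStreets_eq_alt lists
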